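/- GENERATED by tools/from_farm_form.py from prooffarm-gif/accepted/DGifOpen.1/Lemmas.lean (a worked proof of the farm's unit `DGifOpen.1`,
   accepted by the verdict) — do not edit. -/
import Gif.Spec.Units.DGifOpen_1
import Gif.Spec.AllSegs

/-!
  Lemmas for the unit `DGifOpen.1` (segment 1 of `DGifOpen`, dgif_lib.c:172-184): `malloc(120)`, the NULL exit with the checked
  store `*Error = 109`, `memset(gif, 0, 120)`, the two checked stores `SavedImages = NULL`, `SColorMap = NULL`.

  The segment is walked in FOUR STEPS that meet at the return addresses of `malloc` (`ret1`) and `memset` (`ret2`), with a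
  private assertion at each:

      dgo1_AtRet1      the assertion at `ret1` (1086DAH): `Core` + the three argument registers + BOTH outcomes of `malloc`
      dgo1_AtRet2      the assertion at `ret2` (1086F8H): `Core` + `rbx = gif = H.next` live in `H.push 120 (r16 120)`, 120 zero bytes
      dgo1_seg_malloc  1086D0H … `call malloc` … 1086DAH: `Body` → `dgo1_AtRet1`
      dgo1_seg_null    1086DAH … 108834H … 108816H (no room: `rax = 0`): `dgo1_AtRet1` → `Exit`
      dgo1_seg_memset  1086DAH … `call memset` … 1086F8H (room): `dgo1_AtRet1` → `dgo1_AtRet2`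
      dgo1_seg_stores  1086F8H … 10871AH: `dgo1_AtRet2` → `AfterGif`

  Small facts: `dgo1_two`, `dgo1_three` (a property of every window of a literal footprint), `dgo1_err_above` (`*Error` lies at or
  above the entry's `rsp + 8`), `dgo1_zero_field` (a field of a zero-filled object reads 0).
-/

open X86 X86.User Asan ProgX.Base ProgX.Base.Spec Gif.Spec

set_option maxRecDepth 4000
set_option maxHeartbeats 4000000

namespace Gif.Spec.DGifOpen_1

/-- A property of both windows of a two-window footprint. -/
theorem dgo1_two {P : Span → Prop} {a b : Span} (ha : P a) (hb : P b) : ∀ w, w ∈ [a, b] → P w := by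
  intro w hw
  rcases List.mem_cons.mp hw with rfl | hw
  · exact ha
  · rw [List.mem_singleton.mp hw]
    exact hb

/-- **At 1086DAH (ret1), `malloc(120)` has returned**: `Core`; `r13 r14 r15` still hold the three arguments; the cursor and the
constants are untouched; BOTH outcomes of `malloc`'s contract, with the clean stack ending at the body's stack pointer. -/
structure dgo1_AtRet1 (H : Heap) (rest : List Obj) (frames : List (Nat × FrameLayout)) (R : Rd) (u₀ e : State)
    (ret : Word) (v : State) : Prop where
  core : DGifOpen.Core Gif.L.DGifOpen.ret1 H rest frames R u₀ e ret v
  r13 : v.reg .r13 = e.reg .rdx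
  r14 : v.reg .r14 = e.reg .rdi
  r15 : v.reg .r15 = e.reg .rsi
  cursor : CursorOK R v.mem
  consts : Consts v.mem
  /-- room: the new object, live -/
  fits : H.Fits (r16 120) →
    (v.reg .rax).toNat = H.next ∧
    HeapInv (H.push 120 (r16 120)) rest (DGifOpen.framesIn frames e) ((e.reg .rsp).toNat - 120) v.mem
  /-- no room: NULL, the heap as it was -/
  nofit : ¬ H.Fits (r16 120) →
    v.reg .rax = 0 ∧ HeapInv H rest (DGifOpen.framesIn frames e) ((e.reg .rsp).toNat - 120) v.mem

/-- **1086D0H … `call malloc` … 1086DAH (ret1)** (dgif_lib.c:172 `GifFile = malloc(sizeof(GifFileType))`): `edi = 120`; `malloc`'s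
precondition is the heap's invariant over the pushed return address; its footprint lies in the function's stack and in the
window `[800000H, 1000020H)` of the contract (the heap's region and the shadow), off the cursor and off the constants. -/
theorem dgo1_seg_malloc (Lay : Layout) (hLay : Lay.hi = 0x1000000) (μ : Microarch) (hμ : UserX.MicroOK μ) (u₀ : State)
    (hcode : HasCodeNat Lay u₀ Gif.L.DGifOpen.entry Gif.Code.code_DGifOpen.nat Gif.L.DGifOpen.size)
    (H : Heap) (rest : List Obj) (frames : List (Nat × FrameLayout)) (R : Rd) (e : State) (ret : Word)
    (h_malloc : Calls Lay μ ProgX.Base.WayInv (ProgX.Base.conv u₀) ProgX.Base.L.malloc.entry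
      (ProgX.Base.Spec.malloc.spec H rest (DGifOpen.framesIn frames e)))
    (v : State) (hat : DGifOpen.Body H rest frames R u₀ e ret v) :
    ReachVia Lay μ ProgX.Base.WayInv v (dgo1_AtRet1 H rest frames R u₀ e ret) := by
  -- THE PRELUDE: the entry assertion `Body` = `Core` + the three arguments + the heap's invariant + cursor and constants
  obtain ⟨hcore, c_r13, c_r14, c_r15, hinv, hcursor, hconsts⟩ := hat
  have he := hcore.entry
  v_entry he
  obtain ⟨hp, hctx, hcur0, hconsts0, hrdi, hrsi, herr⟩ := hcore.pre
  have w_rip := hcore.rip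
  have c_rsp : v.reg .rsp = e.reg .rsp - 120 := hcore.rsp
  have w_kept : RegsKept [.rsp] v v := RegsKept.refl _ _
  have w_eq : Mem.EqOn ProgX.Base.L.textLo ProgX.Base.L.textHi u₀.mem v.mem := ProgX.Base.conv_code_eqOn hcore.code
  have hdf := (show abiInv _ from hcore.abi).1
  have hmx := (show abiInv _ from hcore.abi).2
  have hsse := ProgX.Base.sseOK_of_abiInv hcore.abi
  -- the slots and the footprint that `Core` at the exit states again
  have k_r15 : v.mem.readLE (e.reg .rsp - 8) 8 = (e.reg .r15).toNat := hcore.slot_r15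
  have k_r14 : v.mem.readLE (e.reg .rsp - 16) 8 = (e.reg .r14).toNat := hcore.slot_r14
  have k_r13 : v.mem.readLE (e.reg .rsp - 24) 8 = (e.reg .r13).toNat := hcore.slot_r13
  have k_r12 : v.mem.readLE (e.reg .rsp - 32) 8 = (e.reg .r12).toNat := hcore.slot_r12
  have k_rbp : v.mem.readLE (e.reg .rsp - 40) 8 = (e.reg .rbp).toNat := hcore.slot_rbp
  have k_rbx : v.mem.readLE (e.reg .rsp - 48) 8 = (e.reg .rbx).toNat := hcore.slot_rbx
  have k_ra : UInt64.ofNat (v.mem.readLE (e.reg .rsp) 8) = ret := hcore.slot_ra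
  have hsame : Mem.SameExcept
    [⟨(e.reg .rsp).toNat - 528, (e.reg .rsp).toNat⟩,
     shadowSpan ((e.reg .rsp).toNat - 120) ((e.reg .rsp).toNat - 56),
     ⟨0x800000, 0x1000020⟩,
     ⟨(e.reg .rdx).toNat, (e.reg .rdx).toNat + 4⟩,
     ⟨R.cur, R.cur + 8⟩] e.mem v.mem := hcore.same
  -- where the cursor and the next object are, as numbers
  have hcur := hctx.cursor_range hp.inv.shadow
  have hbase := hp.base
  have hlimit := hp.limit
  have hnx := HeapPre.next_range hp
  -- THE WALK, to the call's return address
  u_walk hcode [hμ.vendor] until [Gif.L.DGifOpen.ret1] span [ProgX.Base.L.textLo, ProgX.Base.L.textHi] side (v_side)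
  case call_inv =>
    v_inv
  case pre_1086d5 =>
    -- malloc's precondition: the heap's invariant over the pushed return address, at the callee's `rsp + 8` = the body's `rsp`
    have e_rsp : (s_1086d5.reg .rsp).toNat + 8 = (e.reg .rsp).toNat - 120 := by
      rw [w_rsp]
      u_omega
    refine ⟨?_, hbase, hlimit, hp.text, hp.offText⟩
    rw [e_rsp, w_mem]
    exact hinv.writeLE_out _ _ _ (by u_omega) (by rw [hbase]; left; u_omega) (by left; u_omega)
  -- 1086DAH (ret1): malloc has returned
  have e120 : (Word.ofBV 120#32).toNat = 120 := by decide
  have hpost : AllocPost H rest (DGifOpen.framesIn frames e) 32 (s_1086d5.reg .rdi).toNat (r16 (s_1086d5.reg .rdi).toNat)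
      s_1086d5 s_1086d5r := w_post
  rw [w_rdi_1086d5, e120] at hpost
  clear w_post
  have e8 : (s_1086d5.reg .rsp).toNat + 8 = (e.reg .rsp).toNat - 120 := by
    rw [w_rsp_1086d5]
    u_omega
  v_after_call w_rsp_1086d5 w_mem_1086d5
  simp only [shadowSpan, w_rdi_1086d5, e120] at w_same
  -- THE SLOTS AND THE RETURN ADDRESS, over the pushed return address (first step) and through malloc's footprint (second step)
  have hp15 : s_1086d5.mem.readLE (e.reg .rsp - 8) 8 = (e.reg .r15).toNat := by
    rw [w_mem_1086d5]
    u_frame k_r15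
  rw [w_mem_1086d5] at hp15
  have hs15 : s_1086d5r.mem.readLE (e.reg .rsp - 8) 8 = (e.reg .r15).toNat := by u_frame hp15
  have hp14 : s_1086d5.mem.readLE (e.reg .rsp - 16) 8 = (e.reg .r14).toNat := by
    rw [w_mem_1086d5]
    u_frame k_r14
  rw [w_mem_1086d5] at hp14
  have hs14 : s_1086d5r.mem.readLE (e.reg .rsp - 16) 8 = (e.reg .r14).toNat := by u_frame hp14
  have hp13 : s_1086d5.mem.readLE (e.reg .rsp - 24) 8 = (e.reg .r13).toNat := by
    rw [w_mem_1086d5]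
    u_frame k_r13
  rw [w_mem_1086d5] at hp13
  have hs13 : s_1086d5r.mem.readLE (e.reg .rsp - 24) 8 = (e.reg .r13).toNat := by u_frame hp13
  have hp12 : s_1086d5.mem.readLE (e.reg .rsp - 32) 8 = (e.reg .r12).toNat := by
    rw [w_mem_1086d5]
    u_frame k_r12
  rw [w_mem_1086d5] at hp12
  have hs12 : s_1086d5r.mem.readLE (e.reg .rsp - 32) 8 = (e.reg .r12).toNat := by u_frame hp12
  have hpbp : s_1086d5.mem.readLE (e.reg .rsp - 40) 8 = (e.reg .rbp).toNat := by
    rw [w_mem_1086d5]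
    u_frame k_rbp
  rw [w_mem_1086d5] at hpbp
  have hsbp : s_1086d5r.mem.readLE (e.reg .rsp - 40) 8 = (e.reg .rbp).toNat := by u_frame hpbp
  have hpbx : s_1086d5.mem.readLE (e.reg .rsp - 48) 8 = (e.reg .rbx).toNat := by
    rw [w_mem_1086d5]
    u_frame k_rbx
  rw [w_mem_1086d5] at hpbx
  have hsbx : s_1086d5r.mem.readLE (e.reg .rsp - 48) 8 = (e.reg .rbx).toNat := by u_frame hpbx
  have hpra : UInt64.ofNat (s_1086d5.mem.readLE (e.reg .rsp) 8) = ret := by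
    rw [w_mem_1086d5]
    u_frame k_ra
  rw [w_mem_1086d5] at hpra
  have hsra : UInt64.ofNat (s_1086d5r.mem.readLE (e.reg .rsp) 8) = ret := by u_frame hpra
  -- what was written since the cut: the function's stack below its frame, the heap's region and the shadow
  have hs : Mem.SameExcept [⟨(e.reg .rsp).toNat - 528, (e.reg .rsp).toNat - 120⟩, ⟨0x800000, 0x1000020⟩]
      v.mem s_1086d5r.mem := by u_same
  -- the footprint since the entry: malloc's windows lie inside the function's
  have hsame1 : Mem.SameExcept
    [⟨(e.reg .rsp).toNat - 528, (e.reg .rsp).toNat⟩,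
     shadowSpan ((e.reg .rsp).toNat - 120) ((e.reg .rsp).toNat - 56),
     ⟨0x800000, 0x1000020⟩,
     ⟨(e.reg .rdx).toNat, (e.reg .rdx).toNat + 4⟩,
     ⟨R.cur, R.cur + 8⟩] e.mem s_1086d5r.mem := by
    refine hsame.trans ?_
    simp only [shadowSpan]
    u_same
  -- both windows written since the cut lie off the cursor and off the constants
  have hoffcur : ∀ w, w ∈ [(⟨(e.reg .rsp).toNat - 528, (e.reg .rsp).toNat - 120⟩ : Span), ⟨0x800000, 0x1000020⟩] →
      w.hi ≤ R.cur ∨ R.cur + 16 ≤ w.lo := by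
    apply dgo1_two
    · left
      show (e.reg .rsp).toNat - 120 ≤ R.cur
      omega
    · right
      show R.cur + 16 ≤ 0x800000
      omega
  have hoffconst : ∀ w, w ∈ [(⟨(e.reg .rsp).toNat - 528, (e.reg .rsp).toNat - 120⟩ : Span), ⟨0x800000, 0x1000020⟩] →
      w.hi ≤ 0x141300 ∨ 0x14139a ≤ w.lo := by
    apply dgo1_two
    · right
      show 0x14139a ≤ (e.reg .rsp).toNat - 528
      omega
    · right
      show 0x14139a ≤ 0x800000
      omega
  have hrem1 : rem R s_1086d5r.mem = rem R v.mem := rem_sameExcept hs (by omega) hoffcur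
  -- THE EXIT ASSERTION: `Core` at `ret1` …
  have hcore1 : DGifOpen.Core Gif.L.DGifOpen.ret1 H rest frames R u₀ e ret s_1086d5r := {
    entry := hcore.entry
    pre := hcore.pre
    rip := w_rip
    rsp := w_rsp
    r12 := (w_kept.get .r12 rfl).trans hcore.r12
    slot_r15 := hs15
    slot_r14 := hs14
    slot_r13 := hs13
    slot_r12 := hs12
    slot_rbp := hsbp
    slot_rbx := hsbx
    slot_ra := hsra
    rem := by
      rw [hrem1]
      exact hcore.rem
    same := hsame1
    code := w_code
    abi := w_inv
  }
  -- … and what is live at `ret1`: the three arguments, the cursor, the constants, both outcomes of `malloc`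
  refine ReachVia.done ?_
  exact {
    core := hcore1
    r13 := (w_kept.get .r13 rfl).trans c_r13
    r14 := (w_kept.get .r14 rfl).trans c_r14
    r15 := (w_kept.get .r15 rfl).trans c_r15
    cursor := hcursor.sameExcept hs (by omega) hoffcur
    consts := hconsts.sameExcept hs hoffconst
    fits := by
      intro hfit
      obtain ⟨k1, k2⟩ := hpost.1 hfit
      rw [e8] at k2
      exact ⟨k1, k2⟩
    nofit := by
      intro hnf
      obtain ⟨k1, k2, _, _⟩ := hpost.2 hnf
      rw [e8] at k2
      exact ⟨k1, k2⟩
  }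

/-- **`*Error` lies at or above the clean stack's end** (the general fact behind `Core.slot_ra`): the object of `ErrPtr`'s `LiveIn`
is a stack object of a CALLER's frame (a heap object lies at or above 800000H, an object of `rest` off the stack), and every active
frame lies at or above `top`. So the store `*Error = code` meets neither the function's frame nor the return address. -/
theorem dgo1_err_above {H : Heap} {rest : List Obj} {frames : List (Nat × FrameLayout)} {R : Rd} {p top : Nat} {mem : Mem}
    (h : ErrPtr H rest frames R p) (hp : p ≠ 0) (hinv : HeapInv H rest frames top mem) : top ≤ p := by
  rcases h with h0 | ⟨hl, hlo, hhi, _⟩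
  · exact absurd h0 hp
  · obtain ⟨o, ho, k1, k2⟩ := hl
    rcases List.mem_append.mp ho with hs | hoth
    · obtain ⟨bF, hbF, g1, g2⟩ := ShadowInv.stackObj_gran hinv.shadow.stack hs
      obtain ⟨hF, a8, atop, ahi, _⟩ := hinv.shadow.stack.active bF hbF
      unfold Obj.gLo at g1
      omega
    · exfalso
      rcases List.mem_append.mp hoth with hheap | hr
      · obtain ⟨⟨c, hlive⟩, _⟩ := Heap.live_of_mem_liveObjs hheap
        have h1 := hinv.heap.obj_range hlive
        have h2 := hinv.heap.offStack
        have h3 := hinv.heap.room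
        have h4 := hinv.heap.size_le_cap hlive
        simp only at h1 h4
        omega
      · have hoff := hinv.shadow.off o (List.mem_append_right _ hr)
        unfold OffStack at hoff
        omega

/-- **1086DAH (ret1) … 108834H … 108816H, no room** (dgif_lib.c:173-177): `malloc` returned NULL (`FailPost`: the same heap);
`rbx = 0`; if `Error ≠ NULL` the checked store `*Error = 109` (D_GIF_ERR_NOT_ENOUGH_MEM): to the epilogue with the heap `H`. -/
theorem dgo1_seg_null (Lay : Layout) (hLay : Lay.hi = 0x1000000) (μ : Microarch) (hμ : UserX.MicroOK μ) (u₀ : State)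
    (hcode : HasCodeNat Lay u₀ Gif.L.DGifOpen.entry Gif.Code.code_DGifOpen.nat Gif.L.DGifOpen.size)
    (H : Heap) (rest : List Obj) (frames : List (Nat × FrameLayout)) (R : Rd) (e : State) (ret : Word)
    (h_asan_store4_noabort : Asan.SmallCheck Lay μ ProgX.Base.WayInv (ProgX.Base.CodeOK u₀) [.rax, .rcx, .rdx] 4
      ProgX.Base.L.__asan_store4_noabort.entry)
    (v : State) (hat : dgo1_AtRet1 H rest frames R u₀ e ret v) (hnf : ¬ H.Fits (r16 120)) :
    ReachVia Lay μ ProgX.Base.WayInv v (DGifOpen.Exit H rest frames R u₀ e ret) := by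
  -- THE PRELUDE: the assertion at `ret1`, the outcome "no room"
  obtain ⟨hcore, c_r13, c_r14, c_r15, hcursor, hconsts, hfits, hnofit⟩ := hat
  obtain ⟨c_rax, hinv⟩ := hnofit hnf
  clear hfits hnofit
  have he := hcore.entry
  v_entry he
  obtain ⟨hp, hctx, hcur0, hconsts0, hrdi, hrsi, herr⟩ := hcore.pre
  have w_rip := hcore.rip
  have c_rsp : v.reg .rsp = e.reg .rsp - 120 := hcore.rsp
  have w_kept : RegsKept [.rsp] v v := RegsKept.refl _ _
  have w_eq : Mem.EqOn ProgX.Base.L.textLo ProgX.Base.L.textHi u₀.mem v.mem := ProgX.Base.conv_code_eqOn hcore.code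
  have hdf := (show abiInv _ from hcore.abi).1
  have hmx := (show abiInv _ from hcore.abi).2
  have hsse := ProgX.Base.sseOK_of_abiInv hcore.abi
  -- the slots and the footprint that `Core` at the exit states again
  have k_r15 : v.mem.readLE (e.reg .rsp - 8) 8 = (e.reg .r15).toNat := hcore.slot_r15
  have k_r14 : v.mem.readLE (e.reg .rsp - 16) 8 = (e.reg .r14).toNat := hcore.slot_r14
  have k_r13 : v.mem.readLE (e.reg .rsp - 24) 8 = (e.reg .r13).toNat := hcore.slot_r13
  have k_r12 : v.mem.readLE (e.reg .rsp - 32) 8 = (e.reg .r12).toNat := hcore.slot_r12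
  have k_rbp : v.mem.readLE (e.reg .rsp - 40) 8 = (e.reg .rbp).toNat := hcore.slot_rbp
  have k_rbx : v.mem.readLE (e.reg .rsp - 48) 8 = (e.reg .rbx).toNat := hcore.slot_rbx
  have k_ra : UInt64.ofNat (v.mem.readLE (e.reg .rsp) 8) = ret := hcore.slot_ra
  have hsame : Mem.SameExcept
    [⟨(e.reg .rsp).toNat - 528, (e.reg .rsp).toNat⟩,
     shadowSpan ((e.reg .rsp).toNat - 120) ((e.reg .rsp).toNat - 56),
     ⟨0x800000, 0x1000020⟩,
     ⟨(e.reg .rdx).toNat, (e.reg .rdx).toNat + 4⟩,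
     ⟨R.cur, R.cur + 8⟩] e.mem v.mem := hcore.same
  -- where the cursor and the next object are, as numbers
  have hcur := hctx.cursor_range hp.inv.shadow
  have hbase := hp.base
  have hlimit := hp.limit
  have hnx := HeapPre.next_range hp

  by_cases hp0 : (e.reg .rdx).toNat = 0
  · -- `Error = NULL`: nothing is stored
    have e0 : e.reg .rdx = 0 := by
      apply UInt64.toNat_inj.mp
      exact hp0
    rw [e0] at c_r13
    u_walk hcode [hμ.vendor] until [Gif.L.DGifOpen.at_108816] span [ProgX.Base.L.textLo, ProgX.Base.L.textHi] side (v_side)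
    -- 108816H FROM 108837H: no store since `ret1`
    have hcoreX : DGifOpen.Core Gif.L.DGifOpen.at_108816 H rest frames R u₀ e ret s_108837 := {
      entry := hcore.entry
      pre := hcore.pre
      rip := w_rip
      rsp := w_rsp
      r12 := (w_kept.get .r12 rfl).trans hcore.r12
      slot_r15 := by
        rw [w_mem]
        exact k_r15
      slot_r14 := by
        rw [w_mem]
        exact k_r14
      slot_r13 := by
        rw [w_mem]
        exact k_r13
      slot_r12 := by
        rw [w_mem]
        exact k_r12
      slot_rbp := by
        rw [w_mem]
        exact k_rbp
      slot_rbx := by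
        rw [w_mem]
        exact k_rbx
      slot_ra := by
        rw [w_mem]
        exact k_ra
      rem := by
        rw [w_mem]
        exact hcore.rem
      same := by
        rw [w_mem]
        exact hsame
      code := ProgX.Base.conv_code_in w_eq
      abi := by
        refine ProgX.Base.abiInv_of ?_ ?_
        · rw [w_flags]
          simp only [X86.User.df_setStatus]
          exact hdf
        · rw [w_mxcsr]
          exact hmx
    }
    refine ReachVia.done ⟨H, ?_⟩
    exact {
      core := hcoreX
      region := SameRegion.refl H
      inv := by
        rw [w_mem]
        exact hinv
      cursor := by
        rw [w_mem]
        exact hcursor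
      consts := by
        rw [w_mem]
        exact hconsts
      res := by
        left
        rw [w_rbx]
        rfl
    }
  · -- `Error ≠ NULL`: 4 bytes of a stack object of a caller's frame
    have habove := dgo1_err_above herr hp0 hp.inv
    have hlive := DGifOpen.errLive herr hp0 hp.inv H ((e.reg .rsp).toNat - 120, Gif.Frames.DGifOpen)
    rcases herr with h0 | ⟨_, hplo, hphi, hpcur⟩
    · exact absurd h0 hp0
    u_walk hcode [hμ.vendor] until [Gif.L.DGifOpen.at_108816] span [ProgX.Base.L.textLo, ProgX.Base.L.textHi] side (v_side)
    case check_10883c =>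
      -- dgif_lib.c:175 the store of `*Error`: 4 bytes of a stack object of a caller's frame, live whatever the heap is
      have hun : ShadowUntouched v.mem s_10883c.mem := by v_untouched
      exact hlive.accSmall hinv.shadow hun _ 4 (by decide) (by u_omega) (by u_omega)
    -- 108816H FROM 108849H: the check call's return address (stack) and `*Error = 109` were stored
    have hs : Mem.SameExcept [⟨(e.reg .rsp).toNat - 528, (e.reg .rsp).toNat - 120⟩,
        ⟨(e.reg .rdx).toNat, (e.reg .rdx).toNat + 4⟩] v.mem s_108849.mem := by
      rw [w_mem]
      u_same
    have hoffcur : ∀ w, w ∈ [(⟨(e.reg .rsp).toNat - 528, (e.reg .rsp).toNat - 120⟩ : Span),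
        ⟨(e.reg .rdx).toNat, (e.reg .rdx).toNat + 4⟩] → w.hi ≤ R.cur ∨ R.cur + 16 ≤ w.lo := by
      apply dgo1_two
      · left
        show (e.reg .rsp).toNat - 120 ≤ R.cur
        omega
      · exact hpcur
    have hoffconst : ∀ w, w ∈ [(⟨(e.reg .rsp).toNat - 528, (e.reg .rsp).toNat - 120⟩ : Span),
        ⟨(e.reg .rdx).toNat, (e.reg .rdx).toNat + 4⟩] → w.hi ≤ 0x141300 ∨ 0x14139a ≤ w.lo := by
      apply dgo1_two
      · right
        show 0x14139a ≤ (e.reg .rsp).toNat - 528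
        omega
      · right
        show 0x14139a ≤ (e.reg .rdx).toNat
        omega
    have hrem1 : rem R s_108849.mem = rem R v.mem := rem_sameExcept hs (by omega) hoffcur
    -- the heap's invariant over the two stores: both outside the heap's region and outside the shadow
    have hinvA : HeapInv H rest (DGifOpen.framesIn frames e) ((e.reg .rsp).toNat - 120)
        (v.mem.writeLE (e.reg .rsp - 128) 8 1083457) :=
      hinv.writeLE_out _ _ _ (by u_omega) (by rw [hbase]; left; u_omega) (by left; u_omega)
    have hinvB : HeapInv H rest (DGifOpen.framesIn frames e) ((e.reg .rsp).toNat - 120) s_108849.mem := by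
      rw [w_mem]
      exact hinvA.writeLE_out _ _ _ (by omega) (by rw [hbase]; left; omega) (by left; omega)
    have hcoreX : DGifOpen.Core Gif.L.DGifOpen.at_108816 H rest frames R u₀ e ret s_108849 := {
      entry := hcore.entry
      pre := hcore.pre
      rip := w_rip
      rsp := w_rsp
      r12 := (w_kept.get .r12 rfl).trans hcore.r12
      slot_r15 := by
        rw [w_mem]
        u_frame k_r15
      slot_r14 := by
        rw [w_mem]
        u_frame k_r14
      slot_r13 := by
        rw [w_mem]
        u_frame k_r13
      slot_r12 := by
        rw [w_mem]
        u_frame k_r12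
      slot_rbp := by
        rw [w_mem]
        u_frame k_rbp
      slot_rbx := by
        rw [w_mem]
        u_frame k_rbx
      slot_ra := by
        rw [w_mem]
        u_frame k_ra
      rem := by
        rw [hrem1]
        exact hcore.rem
      same := by
        refine hsame.trans ?_
        simp only [shadowSpan]
        u_same
      code := ProgX.Base.conv_code_in w_eq
      abi := by
        refine ProgX.Base.abiInv_of ?_ ?_
        · rw [w_flags]
          exact w_df_10883c
        · rw [w_mxcsr]
          exact hmx
    }
    refine ReachVia.done ⟨H, ?_⟩
    exact {
      core := hcoreX
      region := SameRegion.refl H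
      inv := hinvB
      cursor := hcursor.sameExcept hs (by omega) hoffcur
      consts := hconsts.sameExcept hs hoffconst
      res := by
        left
        rw [w_rbx]
        rfl
    }

/-- **At 1086F8H (ret2), `memset(gif, 0, 120)` has returned**: `Core`; `r13 r14 r15` still hold the three arguments; the cursor and
the constants are untouched; there was room: `rbx = gif = H.next`, the live 120-byte object of the heap `H.push 120 (r16 120)`,
and its 120 bytes are 0. -/
structure dgo1_AtRet2 (H : Heap) (rest : List Obj) (frames : List (Nat × FrameLayout)) (R : Rd) (u₀ e : State)
    (ret : Word) (v : State) : Prop where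
  core : DGifOpen.Core Gif.L.DGifOpen.ret2 H rest frames R u₀ e ret v
  r13 : v.reg .r13 = e.reg .rdx
  r14 : v.reg .r14 = e.reg .rdi
  r15 : v.reg .r15 = e.reg .rsi
  cursor : CursorOK R v.mem
  consts : Consts v.mem
  /-- `mov rbx, rax` (1086DAH): `GifFile`, the new object -/
  rbx : (v.reg .rbx).toNat = H.next
  inv : HeapInv (H.push 120 (r16 120)) rest (DGifOpen.framesIn frames e) ((e.reg .rsp).toNat - 120) v.mem
  /-- `memset`'s post: every byte of the object is 0 -/
  zero : ∀ i, i < 120 → rd v.mem (H.next + i) 1 = 0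

/-- **1086DAH (ret1) … `call memset` … 1086F8H (ret2), room** (dgif_lib.c:172-180): `malloc` returned `gif = H.next ≠ 0`, the
heap is `H.push 120 (r16 120)`; `rbx = gif`; `memset(gif, 0, 120)`: its precondition is the shadow clause for the heap WITH the new
object and `LiveIn` of the new live object (`Heap.live_push`); its footprint — the 120 bytes of the object, 64 bytes of stack —
keeps the heap's invariant (`HeapInv.sameExcept_stack_live`). -/
theorem dgo1_seg_memset (Lay : Layout) (hLay : Lay.hi = 0x1000000) (μ : Microarch) (hμ : UserX.MicroOK μ) (u₀ : State)
    (hcode : HasCodeNat Lay u₀ Gif.L.DGifOpen.entry Gif.Code.code_DGifOpen.nat Gif.L.DGifOpen.size)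
    (H : Heap) (rest : List Obj) (frames : List (Nat × FrameLayout)) (R : Rd) (e : State) (ret : Word)
    (h_memset : Calls Lay μ ProgX.Base.WayInv (ProgX.Base.conv u₀) ProgX.Base.L.memset.entry
      (ProgX.Base.Spec.memset.spec ((H.push 120 (r16 120)).liveObjs ++ rest) (DGifOpen.framesIn frames e)))
    (v : State) (hat : dgo1_AtRet1 H rest frames R u₀ e ret v) (hfit : H.Fits (r16 120)) :
    ReachVia Lay μ ProgX.Base.WayInv v (dgo1_AtRet2 H rest frames R u₀ e ret) := by
  -- THE PRELUDE: the assertion at `ret1`, the outcome "room"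
  obtain ⟨hcore, c_r13, c_r14, c_r15, hcursor, hconsts, hfits, hnofit⟩ := hat
  obtain ⟨hpn, hinv⟩ := hfits hfit
  clear hfits hnofit
  -- `rax = gif` as a variable `g`
  obtain ⟨g, c_rax⟩ : ∃ g, v.reg .rax = g := ⟨_, rfl⟩
  rw [c_rax] at hpn
  have he := hcore.entry
  v_entry he
  obtain ⟨hp, hctx, hcur0, hconsts0, hrdi, hrsi, herr⟩ := hcore.pre
  have w_rip := hcore.rip
  have c_rsp : v.reg .rsp = e.reg .rsp - 120 := hcore.rsp
  have w_kept : RegsKept [.rsp] v v := RegsKept.refl _ _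
  have w_eq : Mem.EqOn ProgX.Base.L.textLo ProgX.Base.L.textHi u₀.mem v.mem := ProgX.Base.conv_code_eqOn hcore.code
  have hdf := (show abiInv _ from hcore.abi).1
  have hmx := (show abiInv _ from hcore.abi).2
  have hsse := ProgX.Base.sseOK_of_abiInv hcore.abi
  -- the slots and the footprint that `Core` at the exit states again
  have k_r15 : v.mem.readLE (e.reg .rsp - 8) 8 = (e.reg .r15).toNat := hcore.slot_r15
  have k_r14 : v.mem.readLE (e.reg .rsp - 16) 8 = (e.reg .r14).toNat := hcore.slot_r14
  have k_r13 : v.mem.readLE (e.reg .rsp - 24) 8 = (e.reg .r13).toNat := hcore.slot_r13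
  have k_r12 : v.mem.readLE (e.reg .rsp - 32) 8 = (e.reg .r12).toNat := hcore.slot_r12
  have k_rbp : v.mem.readLE (e.reg .rsp - 40) 8 = (e.reg .rbp).toNat := hcore.slot_rbp
  have k_rbx : v.mem.readLE (e.reg .rsp - 48) 8 = (e.reg .rbx).toNat := hcore.slot_rbx
  have k_ra : UInt64.ofNat (v.mem.readLE (e.reg .rsp) 8) = ret := hcore.slot_ra
  have hsame : Mem.SameExcept
    [⟨(e.reg .rsp).toNat - 528, (e.reg .rsp).toNat⟩,
     shadowSpan ((e.reg .rsp).toNat - 120) ((e.reg .rsp).toNat - 56),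
     ⟨0x800000, 0x1000020⟩,
     ⟨(e.reg .rdx).toNat, (e.reg .rdx).toNat + 4⟩,
     ⟨R.cur, R.cur + 8⟩] e.mem v.mem := hcore.same
  -- where the cursor and the next object are, as numbers
  have hcur := hctx.cursor_range hp.inv.shadow
  have hbase := hp.base
  have hlimit := hp.limit
  have hnx := HeapPre.next_range hp

  have hbase' : (H.push 120 (r16 120)).base = 0x800000 := hbase
  have hlimit' : (H.push 120 (r16 120)).limit = 0xC00000 := hlimit
  have hnl := hfit.next_le
  rw [hlimit] at hnl
  -- THE WALK: `mov rbx, rax ; test rax, rax ; je` (not taken: `gif = H.next ≠ 0`), the three arguments, the call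
  u_walk hcode [hμ.vendor] until [Gif.L.DGifOpen.ret2] span [ProgX.Base.L.textLo, ProgX.Base.L.textHi] side (v_side)
  case call_inv =>
    v_inv
  case pre_1086f3 =>
    -- memset's precondition, over the heap WITH the new object
    have e_rsp : (s_1086f3.reg .rsp).toNat + 8 = (e.reg .rsp).toNat - 120 := by
      rw [w_rsp]
      u_omega
    have hinv' : HeapInv (H.push 120 (r16 120)) rest (DGifOpen.framesIn frames e) ((s_1086f3.reg .rsp).toNat + 8)
        s_1086f3.mem := by
      rw [e_rsp, w_mem]
      exact hinv.writeLE_out _ _ _ (by u_omega) (by rw [hbase']; left; u_omega) (by left; u_omega)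
    have hp' : HeapPre (H.push 120 (r16 120)) rest (DGifOpen.framesIn frames e) s_1086f3 :=
      ⟨hinv', hbase', hlimit', hp.text, hp.offText⟩
    refine ⟨hp'.shadowPre, ?_⟩
    right
    rw [w_rdi, w_rdx, hpn]
    -- the destination is the new live object
    exact (Heap.live_push H 120 (r16 120)).liveIn rest _ (Nat.le_refl _) (Nat.le_refl _)
  -- 1086F8H (ret2): memset has returned
  have e120 : (Word.ofBV 120#32).toNat = 120 := by decide
  have e0 : (Word.ofBV 0#32).toNat = 0 := by decide
  obtain ⟨_, hunc, hbytes⟩ : s_1086f3r.reg .rax = s_1086f3.reg .rdi ∧ ShadowUntouched s_1086f3.mem s_1086f3r.mem ∧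
      ∀ i, i < (s_1086f3.reg .rdx).toNat →
        s_1086f3r.mem.readLE (s_1086f3.reg .rdi + UInt64.ofNat i) 1 = (s_1086f3.reg .rsi).toNat % 256 := w_post
  rw [w_mem_1086f3] at hunc
  rw [w_rdx_1086f3, w_rdi_1086f3, w_rsi_1086f3, e120, e0] at hbytes
  v_after_call w_rsp_1086f3 w_mem_1086f3
  simp only [w_rdi_1086f3, w_rdx_1086f3, e120, hpn] at w_same
  -- THE SLOTS AND THE RETURN ADDRESS, over the pushed return address (first step) and through memset's footprint (second step)
  have hp15 : s_1086f3.mem.readLE (e.reg .rsp - 8) 8 = (e.reg .r15).toNat := by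
    rw [w_mem_1086f3]
    u_frame k_r15
  rw [w_mem_1086f3] at hp15
  have hs15 : s_1086f3r.mem.readLE (e.reg .rsp - 8) 8 = (e.reg .r15).toNat := by u_frame hp15
  have hp14 : s_1086f3.mem.readLE (e.reg .rsp - 16) 8 = (e.reg .r14).toNat := by
    rw [w_mem_1086f3]
    u_frame k_r14
  rw [w_mem_1086f3] at hp14
  have hs14 : s_1086f3r.mem.readLE (e.reg .rsp - 16) 8 = (e.reg .r14).toNat := by u_frame hp14
  have hp13 : s_1086f3.mem.readLE (e.reg .rsp - 24) 8 = (e.reg .r13).toNat := by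
    rw [w_mem_1086f3]
    u_frame k_r13
  rw [w_mem_1086f3] at hp13
  have hs13 : s_1086f3r.mem.readLE (e.reg .rsp - 24) 8 = (e.reg .r13).toNat := by u_frame hp13
  have hp12 : s_1086f3.mem.readLE (e.reg .rsp - 32) 8 = (e.reg .r12).toNat := by
    rw [w_mem_1086f3]
    u_frame k_r12
  rw [w_mem_1086f3] at hp12
  have hs12 : s_1086f3r.mem.readLE (e.reg .rsp - 32) 8 = (e.reg .r12).toNat := by u_frame hp12
  have hpbp : s_1086f3.mem.readLE (e.reg .rsp - 40) 8 = (e.reg .rbp).toNat := by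
    rw [w_mem_1086f3]
    u_frame k_rbp
  rw [w_mem_1086f3] at hpbp
  have hsbp : s_1086f3r.mem.readLE (e.reg .rsp - 40) 8 = (e.reg .rbp).toNat := by u_frame hpbp
  have hpbx : s_1086f3.mem.readLE (e.reg .rsp - 48) 8 = (e.reg .rbx).toNat := by
    rw [w_mem_1086f3]
    u_frame k_rbx
  rw [w_mem_1086f3] at hpbx
  have hsbx : s_1086f3r.mem.readLE (e.reg .rsp - 48) 8 = (e.reg .rbx).toNat := by u_frame hpbx
  have hpra : UInt64.ofNat (s_1086f3.mem.readLE (e.reg .rsp) 8) = ret := by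
    rw [w_mem_1086f3]
    u_frame k_ra
  rw [w_mem_1086f3] at hpra
  have hsra : UInt64.ofNat (s_1086f3r.mem.readLE (e.reg .rsp) 8) = ret := by u_frame hpra
  -- the heap's invariant: over the pushed return address, then over memset's footprint (stack and the new live object)
  have hinv1 : HeapInv (H.push 120 (r16 120)) rest (DGifOpen.framesIn frames e) ((e.reg .rsp).toNat - 120)
      (v.mem.writeLE (e.reg .rsp - 128) 8 1083128) :=
    hinv.writeLE_out _ _ _ (by u_omega) (by rw [hbase']; left; u_omega) (by left; u_omega)
  have hinv2 : HeapInv (H.push 120 (r16 120)) rest (DGifOpen.framesIn frames e) ((e.reg .rsp).toNat - 120) s_1086f3r.mem :=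
    hinv1.sameExcept_stack_live hbase' hunc (by u_omega) (Heap.live_push H 120 (r16 120)) (Nat.le_refl _) (Nat.le_refl _) w_same
  -- what was written since `ret1`: the function's stack below its frame, the heap's region
  have hs : Mem.SameExcept [⟨(e.reg .rsp).toNat - 528, (e.reg .rsp).toNat - 120⟩, ⟨0x800000, 0x1000020⟩]
      v.mem s_1086f3r.mem := by u_same
  have hsame1 : Mem.SameExcept
    [⟨(e.reg .rsp).toNat - 528, (e.reg .rsp).toNat⟩,
     shadowSpan ((e.reg .rsp).toNat - 120) ((e.reg .rsp).toNat - 56),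
     ⟨0x800000, 0x1000020⟩,
     ⟨(e.reg .rdx).toNat, (e.reg .rdx).toNat + 4⟩,
     ⟨R.cur, R.cur + 8⟩] e.mem s_1086f3r.mem := by
    refine hsame.trans ?_
    simp only [shadowSpan]
    u_same
  -- both windows lie off the cursor and off the constants
  have hoffcur : ∀ w, w ∈ [(⟨(e.reg .rsp).toNat - 528, (e.reg .rsp).toNat - 120⟩ : Span), ⟨0x800000, 0x1000020⟩] →
      w.hi ≤ R.cur ∨ R.cur + 16 ≤ w.lo := by
    apply dgo1_two
    · left
      show (e.reg .rsp).toNat - 120 ≤ R.cur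
      omega
    · right
      show R.cur + 16 ≤ 0x800000
      omega
  have hoffconst : ∀ w, w ∈ [(⟨(e.reg .rsp).toNat - 528, (e.reg .rsp).toNat - 120⟩ : Span), ⟨0x800000, 0x1000020⟩] →
      w.hi ≤ 0x141300 ∨ 0x14139a ≤ w.lo := by
    apply dgo1_two
    · right
      show 0x14139a ≤ (e.reg .rsp).toNat - 528
      omega
    · right
      show 0x14139a ≤ 0x800000
      omega
  have hrem1 : rem R s_1086f3r.mem = rem R v.mem := rem_sameExcept hs (by omega) hoffcur
  -- THE EXIT ASSERTION: `Core` at `ret2` …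
  have hcore1 : DGifOpen.Core Gif.L.DGifOpen.ret2 H rest frames R u₀ e ret s_1086f3r := {
    entry := hcore.entry
    pre := hcore.pre
    rip := w_rip
    rsp := w_rsp
    r12 := (w_kept.get .r12 rfl).trans hcore.r12
    slot_r15 := hs15
    slot_r14 := hs14
    slot_r13 := hs13
    slot_r12 := hs12
    slot_rbp := hsbp
    slot_rbx := hsbx
    slot_ra := hsra
    rem := by
      rw [hrem1]
      exact hcore.rem
    same := hsame1
    code := w_code
    abi := w_inv
  }
  -- … and what is live at `ret2`
  refine ReachVia.done ?_
  exact {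
    core := hcore1
    r13 := (w_kept.get .r13 rfl).trans c_r13
    r14 := (w_kept.get .r14 rfl).trans c_r14
    r15 := (w_kept.get .r15 rfl).trans c_r15
    cursor := hcursor.sameExcept hs (by omega) hoffcur
    consts := hconsts.sameExcept hs hoffconst
    rbx := by
      rw [w_rbx]
      exact hpn
    inv := hinv2
    zero := by
      intro i hi
      rw [← rd_eq_readLE s_1086f3r.mem (g + UInt64.ofNat i) (H.next + i) 1 (by u_omega)]
      exact hbytes i hi
  }

/-- A property of the three windows of a three-window footprint. -/
theorem dgo1_three {P : Span → Prop} {a b c : Span} (ha : P a) (hb : P b) (hc : P c) : ∀ w, w ∈ [a, b, c] → P w := by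
  intro w hw
  rcases List.mem_cons.mp hw with rfl | hw
  · exact ha
  · exact dgo1_two hb hc w hw

/-- **A field of a zero-filled object reads 0**: `n` bytes at the offset `off` of an object of `sz` zero bytes. -/
theorem dgo1_zero_field {mem : Mem} {p sz : Nat} (hz : ∀ i, i < sz → rd mem (p + i) 1 = 0) (off n : Nat) (h : off + n ≤ sz) :
    rd mem (p + off) n = 0 := by
  apply DGifOpen.rd_zero_of_bytes
  intro i hi
  rw [Nat.add_assoc]
  exact hz (off + i) (by omega)

/-- **1086F8H (ret2) … 10871AH** (dgif_lib.c:183-184): the checked stores `GifFile->SavedImages = NULL` (`gif + 72`) and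
`GifFile->SColorMap = NULL` (`gif + 24`), both 8 bytes inside the new live object. At the cut the heap is `H.push 120 (r16 120)`,
`gif = H.next` is owned, and its six pointer / count fields read 0 (the two stored ones as stored, the others from `memset`). -/
theorem dgo1_seg_stores (Lay : Layout) (hLay : Lay.hi = 0x1000000) (μ : Microarch) (hμ : UserX.MicroOK μ) (u₀ : State)
    (hcode : HasCodeNat Lay u₀ Gif.L.DGifOpen.entry Gif.Code.code_DGifOpen.nat Gif.L.DGifOpen.size)
    (H : Heap) (rest : List Obj) (frames : List (Nat × FrameLayout)) (R : Rd) (e : State) (ret : Word)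
    (h_asan_store8_noabort : Asan.SmallCheck Lay μ ProgX.Base.WayInv (ProgX.Base.CodeOK u₀) [.rax, .rcx, .rdx] 8
      ProgX.Base.L.__asan_store8_noabort.entry)
    (v : State) (hat : dgo1_AtRet2 H rest frames R u₀ e ret v) :
    ReachVia Lay μ ProgX.Base.WayInv v (DGifOpen.AfterGif H rest frames R (H.push 120 (r16 120)) H.next u₀ e ret) := by
  -- THE PRELUDE: the assertion at `ret2`
  obtain ⟨hcore, c_r13, c_r14, c_r15, hcursor, hconsts, hg, hinv, hzero⟩ := hat
  -- `rbx = gif` as a variable `g`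
  obtain ⟨g, c_rbx⟩ : ∃ g, v.reg .rbx = g := ⟨_, rfl⟩
  rw [c_rbx] at hg
  have he := hcore.entry
  v_entry he
  obtain ⟨hp, hctx, hcur0, hconsts0, hrdi, hrsi, herr⟩ := hcore.pre
  have w_rip := hcore.rip
  have c_rsp : v.reg .rsp = e.reg .rsp - 120 := hcore.rsp
  have w_kept : RegsKept [.rsp] v v := RegsKept.refl _ _
  have w_eq : Mem.EqOn ProgX.Base.L.textLo ProgX.Base.L.textHi u₀.mem v.mem := ProgX.Base.conv_code_eqOn hcore.code
  have hdf := (show abiInv _ from hcore.abi).1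
  have hmx := (show abiInv _ from hcore.abi).2
  have hsse := ProgX.Base.sseOK_of_abiInv hcore.abi
  -- the slots and the footprint that `Core` at the exit states again
  have k_r15 : v.mem.readLE (e.reg .rsp - 8) 8 = (e.reg .r15).toNat := hcore.slot_r15
  have k_r14 : v.mem.readLE (e.reg .rsp - 16) 8 = (e.reg .r14).toNat := hcore.slot_r14
  have k_r13 : v.mem.readLE (e.reg .rsp - 24) 8 = (e.reg .r13).toNat := hcore.slot_r13
  have k_r12 : v.mem.readLE (e.reg .rsp - 32) 8 = (e.reg .r12).toNat := hcore.slot_r12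
  have k_rbp : v.mem.readLE (e.reg .rsp - 40) 8 = (e.reg .rbp).toNat := hcore.slot_rbp
  have k_rbx : v.mem.readLE (e.reg .rsp - 48) 8 = (e.reg .rbx).toNat := hcore.slot_rbx
  have k_ra : UInt64.ofNat (v.mem.readLE (e.reg .rsp) 8) = ret := hcore.slot_ra
  have hsame : Mem.SameExcept
    [⟨(e.reg .rsp).toNat - 528, (e.reg .rsp).toNat⟩,
     shadowSpan ((e.reg .rsp).toNat - 120) ((e.reg .rsp).toNat - 56),
     ⟨0x800000, 0x1000020⟩,
     ⟨(e.reg .rdx).toNat, (e.reg .rdx).toNat + 4⟩,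
     ⟨R.cur, R.cur + 8⟩] e.mem v.mem := hcore.same
  -- where the cursor and the next object are, as numbers
  have hcur := hctx.cursor_range hp.inv.shadow
  have hbase := hp.base
  have hlimit := hp.limit
  have hnx := HeapPre.next_range hp

  have hbase' : (H.push 120 (r16 120)).base = 0x800000 := hbase
  have hfit : H.Fits (r16 120) := hinv.heap.fits_of_push
  have hnl := hfit.next_le
  have e128 : r16 120 = 128 := by decide
  rw [hlimit, e128] at hnl
  -- gif is live under the body's frames: what both check goals ask
  have hlv : (H.push 120 (r16 120)).Live H.next 120 := Heap.live_push H 120 (r16 120)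
  have hgl : LiveIn ((H.push 120 (r16 120)).liveObjs ++ rest) (DGifOpen.framesIn frames e) H.next 120 :=
    hlv.liveIn rest _ (Nat.le_refl _) (Nat.le_refl _)
  -- THE WALK, to the cut
  u_walk hcode [hμ.vendor] until [Gif.L.DGifOpen.at_10871a] span [ProgX.Base.L.textLo, ProgX.Base.L.textHi] side (v_side)
  case check_1086fc =>
    -- dgif_lib.c:183 the store of `GifFile->SavedImages`: 8 bytes at `gif + 72`, inside the new live object
    have hun : ShadowUntouched v.mem s_1086fc.mem := by v_untouched
    exact hgl.accSmall hinv.shadow hun _ 8 (by decide) (by u_omega) (by u_omega)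
  case check_10870d =>
    -- dgif_lib.c:184 the store of `GifFile->SColorMap`: 8 bytes at `gif + 24`
    have hun : ShadowUntouched v.mem s_10870d.mem := by v_untouched
    exact hgl.accSmall hinv.shadow hun _ 8 (by decide) (by u_omega) (by u_omega)
  -- 10871AH: the four stores since `ret2`: two return addresses of check calls (stack), the two fields of gif
  have hs : Mem.SameExcept [⟨(e.reg .rsp).toNat - 528, (e.reg .rsp).toNat - 120⟩, ⟨0x800000, 0x1000020⟩]
      v.mem s_108712.mem := by
    rw [w_mem]
    u_same
  have hs3 : Mem.SameExcept [⟨(e.reg .rsp).toNat - 528, (e.reg .rsp).toNat - 120⟩, ⟨H.next + 24, H.next + 32⟩,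
      ⟨H.next + 72, H.next + 80⟩] v.mem s_108712.mem := by
    rw [w_mem]
    u_same
  -- both windows of `hs` lie off the cursor and off the constants
  have hoffcur : ∀ w, w ∈ [(⟨(e.reg .rsp).toNat - 528, (e.reg .rsp).toNat - 120⟩ : Span), ⟨0x800000, 0x1000020⟩] →
      w.hi ≤ R.cur ∨ R.cur + 16 ≤ w.lo := by
    apply dgo1_two
    · left
      show (e.reg .rsp).toNat - 120 ≤ R.cur
      omega
    · right
      show R.cur + 16 ≤ 0x800000
      omega
  have hoffconst : ∀ w, w ∈ [(⟨(e.reg .rsp).toNat - 528, (e.reg .rsp).toNat - 120⟩ : Span), ⟨0x800000, 0x1000020⟩] →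
      w.hi ≤ 0x141300 ∨ 0x14139a ≤ w.lo := by
    apply dgo1_two
    · right
      show 0x14139a ≤ (e.reg .rsp).toNat - 528
      omega
    · right
      show 0x14139a ≤ 0x800000
      omega
  have hrem1 : rem R s_108712.mem = rem R v.mem := rem_sameExcept hs (by omega) hoffcur
  -- the heap's invariant over the four stores: stack, the live object, stack, the live object
  have hinvA : HeapInv (H.push 120 (r16 120)) rest (DGifOpen.framesIn frames e) ((e.reg .rsp).toNat - 120)
      (v.mem.writeLE (e.reg .rsp - 128) 8 1083137) :=
    hinv.writeLE_out _ _ _ (by u_omega) (by rw [hbase']; left; u_omega) (by left; u_omega)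
  have hinvB := hinvA.writeLE_live hlv (g + 72) 8 0 (by u_omega) (by u_omega)
  have hinvC : HeapInv (H.push 120 (r16 120)) rest (DGifOpen.framesIn frames e) ((e.reg .rsp).toNat - 120)
      (((v.mem.writeLE (e.reg .rsp - 128) 8 1083137).writeLE (g + 72) 8 0).writeLE (e.reg .rsp - 128) 8 1083154) :=
    hinvB.writeLE_out _ _ _ (by u_omega) (by rw [hbase']; left; u_omega) (by left; u_omega)
  have hinvD := hinvC.writeLE_live hlv (g + 24) 8 0 (by u_omega) (by u_omega)
  rw [← w_mem] at hinvD
  -- a field of gif that none of the four stores meets still reads 0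
  have hkeep : ∀ off n, off + n ≤ 120 → (off + n ≤ 24 ∨ 32 ≤ off) → (off + n ≤ 72 ∨ 80 ≤ off) →
      rd s_108712.mem (H.next + off) n = 0 := by
    intro off n h1 h2 h3
    rw [hs3.rd (H.next + off) n (by omega) ?_]
    · exact dgo1_zero_field hzero off n h1
    · apply dgo1_three
      · right
        show (e.reg .rsp).toNat - 120 ≤ H.next + off
        omega
      · show H.next + off + n ≤ H.next + 24 ∨ H.next + 32 ≤ H.next + off
        omega
      · show H.next + off + n ≤ H.next + 72 ∨ H.next + 80 ≤ H.next + off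
        omega
  -- THE EXIT ASSERTION: `Core` at the cut …
  have hcore1 : DGifOpen.Core Gif.L.DGifOpen.at_10871a H rest frames R u₀ e ret s_108712 := {
    entry := hcore.entry
    pre := hcore.pre
    rip := w_rip
    rsp := w_rsp
    r12 := (w_kept.get .r12 rfl).trans hcore.r12
    slot_r15 := by
      rw [w_mem]
      u_frame k_r15
    slot_r14 := by
      rw [w_mem]
      u_frame k_r14
    slot_r13 := by
      rw [w_mem]
      u_frame k_r13
    slot_r12 := by
      rw [w_mem]
      u_frame k_r12
    slot_rbp := by
      rw [w_mem]
      u_frame k_rbp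
    slot_rbx := by
      rw [w_mem]
      u_frame k_rbx
    slot_ra := by
      rw [w_mem]
      u_frame k_ra
    rem := by
      rw [hrem1]
      exact hcore.rem
    same := by
      refine hsame.trans ?_
      simp only [shadowSpan]
      u_same
    code := ProgX.Base.conv_code_in w_eq
    abi := by
      refine ProgX.Base.abiInv_of ?_ ?_
      · rw [w_flags]
        exact w_df_10870d
      · rw [w_mxcsr]
        exact hmx
  }
  -- … and `AfterGif`: the heap with the new object, gif owned, its six pointer / count fields 0
  refine ReachVia.done ?_
  exact {
    core := hcore1
    r13 := (w_kept.get .r13 rfl).trans c_r13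
    r14 := (w_kept.get .r14 rfl).trans c_r14
    r15 := (w_kept.get .r15 rfl).trans c_r15
    rbx := by
      rw [(w_kept.get .rbx rfl).trans c_rbx]
      exact hg
    region := SameRegion.push H 120 (r16 120)
    inv := hinvD
    own := (Owns.nil H).push_cons hp.inv.heap 120 (r16 120)
    zero := {
      scm := by
        show rd s_108712.mem (H.next + 24) 8 = 0
        rw [w_mem]
        exact rd_writeLE_same _ (g + 24) 8 0 (H.next + 24) (by u_omega) (by omega)
      count := hkeep 32 4 (by omega) (by omega) (by omega)
      icm := hkeep 64 8 (by omega) (by omega) (by omega)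
      saved := by
        show rd s_108712.mem (H.next + 72) 8 = 0
        rw [w_mem]
        rw [rd_writeLE_disjoint _ (g + 24) 8 0 (H.next + 72) 8 (by u_omega) (by omega) (by right; u_omega)]
        rw [rd_writeLE_disjoint _ (e.reg .rsp - 128) 8 1083154 (H.next + 72) 8 (by u_omega) (by omega) (by right; u_omega)]
        exact rd_writeLE_same _ (g + 72) 8 0 (H.next + 72) (by u_omega) (by omega)
      extCount := hkeep 80 4 (by omega) (by omega) (by omega)
      exts := hkeep 88 8 (by omega) (by omega) (by omega)
    }
    cursor := hcursor.sameExcept hs (by omega) hoffcur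
    consts := hconsts.sameExcept hs hoffconst
  }

end Gif.Spec.DGifOpen_1
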